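-- pv_equiv track=rewrite | github.com/ilyindanny/python_study | files/Seminars/006/Homework 006/01 game X0.py | set_map
-- ===== SOURCE A (Python) =====
-- def set_map(n: int) -> list:
-- 	"""Создание набора выигрышных строк"""
-- 	map_01 = []
--
-- 	for i in range(n + n + 2):
-- 		map_01.append([0] * n)
--
-- 	l = 1
-- 	for i in range(n):
-- 		for j in range(n):
-- 			map_01[i][j] = l
-- 			l += 1
-- 	l = 1
-- 	for i in range(n):
-- 		for j in range(n, n + n):
-- 			map_01[j][i] = l
-- 			l += 1
-- 	l = 1
-- 	for i in range(n):
-- 		for j in range(n + n, n + n + 1):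
-- 			map_01[j][i] = l
-- 			l += n + 1
-- 	l = n
-- 	for i in range(n):
-- 		for j in range(n + n + 1, n + n + 2):
-- 			map_01[j][i] = l
-- 			l += n - 1
--
-- 	for i in range(len(map_01)):
-- 		map_01[i] = set(map_01[i])
--
-- 	return map_01
-- ===== SOURCE B (Python) =====
-- def set_map(n: int) -> list:
-- 	"""Создание набора выигрышных строк"""
-- 	# Single scatter pass: walk the board cell by cell once and drop each cell
-- 	# number into every winning-line bucket (row, column, diagonals) containing it.
-- 	buckets = [[] for _ in range(n + n + 2)]
-- 	for r in range(n):
-- 		for col in range(n):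
-- 			c = r * n + col + 1
-- 			buckets[r].append(c)
-- 			buckets[n + col].append(c)
-- 			if r == col:
-- 				buckets[n + n].append(c)
-- 			if r + col == n - 1:
-- 				buckets[n + n + 1].append(c)
-- 	return [set(b) for b in buckets]
-- ===== Notes on version B (the rewrite author's own statement) =====
-- stated objective: alternative
-- what changed: Replaces A's per-line gather (fill a (2n+2)xn scratch matrix with four separate running-counter passes, one pass per kind of line, then setify rows) with a single scatter pass over the board cells: each cell number is computed once and distributed into every winning-line bucket that contains it (its row, its column, and conditionally the two diagonals).
import Mathlib
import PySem

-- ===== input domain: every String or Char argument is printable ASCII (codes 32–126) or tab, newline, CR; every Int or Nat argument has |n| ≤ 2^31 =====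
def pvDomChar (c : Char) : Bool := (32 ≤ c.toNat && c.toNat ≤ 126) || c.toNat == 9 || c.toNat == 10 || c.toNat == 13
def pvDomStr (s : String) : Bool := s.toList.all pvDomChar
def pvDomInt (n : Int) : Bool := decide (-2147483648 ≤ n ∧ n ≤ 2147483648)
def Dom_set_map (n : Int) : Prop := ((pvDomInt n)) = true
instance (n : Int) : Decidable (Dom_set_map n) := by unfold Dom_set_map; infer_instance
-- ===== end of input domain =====

-- B replaces A's per-line matrix fill (four running-counter passes, then setify) with a single
-- scatter pass over the board cells, dropping each cell number into every winning-line bucket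
-- (row, column, diagonals) that contains it (objective: alternative decomposition, same cost).


-- ===== PORT A =====
-- map_01[j][i] = v  (indices produced by range(...) are in range and nonnegative, so pyGetD/pySetD are exact)
def pvSet2 (m : List (List Int)) (j i v : Int) : List (List Int) :=
  PySem.List.pySetD m j (PySem.List.pySetD (PySem.List.pyGetD m j []) i v)

def set_map (n : Int) : List (List Int) :=
  -- map_01 = []; for i in range(n+n+2): map_01.append([0]*n)   ([0]*n is replicate n.toNat 0, exact)
  let m0 : List (List Int) :=
    (PySem.List.pyRange 0 (n + n + 2) 1).foldl
      (fun acc _ => acc ++ [List.replicate n.toNat 0]) []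
  -- l = 1; for i in range(n): for j in range(n): map_01[i][j] = l; l += 1
  let s1 := (PySem.List.pyRange 0 n 1).foldl
      (fun (s : List (List Int) × Int) i =>
        (PySem.List.pyRange 0 n 1).foldl
          (fun (s : List (List Int) × Int) j => (pvSet2 s.1 i j s.2, s.2 + 1)) s)
      (m0, 1)
  -- l = 1; for i in range(n): for j in range(n, n+n): map_01[j][i] = l; l += 1
  let s2 := (PySem.List.pyRange 0 n 1).foldl
      (fun (s : List (List Int) × Int) i =>
        (PySem.List.pyRange n (n + n) 1).foldl
          (fun (s : List (List Int) × Int) j => (pvSet2 s.1 j i s.2, s.2 + 1)) s)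
      (s1.1, 1)
  -- l = 1; for i in range(n): for j in range(n+n, n+n+1): map_01[j][i] = l; l += n + 1
  let s3 := (PySem.List.pyRange 0 n 1).foldl
      (fun (s : List (List Int) × Int) i =>
        (PySem.List.pyRange (n + n) (n + n + 1) 1).foldl
          (fun (s : List (List Int) × Int) j => (pvSet2 s.1 j i s.2, s.2 + (n + 1))) s)
      (s2.1, 1)
  -- l = n; for i in range(n): for j in range(n+n+1, n+n+2): map_01[j][i] = l; l += n - 1
  let s4 := (PySem.List.pyRange 0 n 1).foldl
      (fun (s : List (List Int) × Int) i =>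
        (PySem.List.pyRange (n + n + 1) (n + n + 2) 1).foldl
          (fun (s : List (List Int) × Int) j => (pvSet2 s.1 j i s.2, s.2 + (n - 1))) s)
      (s3.1, n)
  -- for i in range(len(map_01)): map_01[i] = set(map_01[i])
  s4.1.map (fun row => PySem.Set.ofList row)

-- ===== PORT B =====
-- buckets[j].append(c)  (index j produced by the loops is in range and nonnegative, so pyGetD/pySetD are exact)
def pvApp (m : List (List Int)) (j c : Int) : List (List Int) :=
  PySem.List.pySetD m j (PySem.List.pyGetD m j [] ++ [c])

-- the body of B's inner loop: scatter cell (r, col) into its row, column and diagonal buckets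
def pvScatterStep (n : Int) (bs : List (List Int)) (r col : Int) : List (List Int) :=
  let c := r * n + col + 1
  let bs1 := pvApp bs r c
  let bs2 := pvApp bs1 (n + col) c
  let bs3 := if r = col then pvApp bs2 (n + n) c else bs2
  if r + col = n - 1 then pvApp bs3 (n + n + 1) c else bs3

def set_map_alt (n : Int) : List (List Int) :=
  -- buckets = [[] for _ in range(n + n + 2)]
  let buckets0 : List (List Int) := (PySem.List.pyRange 0 (n + n + 2) 1).map (fun _ => [])
  -- for r in range(n): for col in range(n): <scatter cell (r, col)>
  let buckets := (PySem.List.pyRange 0 n 1).foldl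
    (fun bs r => (PySem.List.pyRange 0 n 1).foldl (fun bs col => pvScatterStep n bs r col) bs)
    buckets0
  -- return [set(b) for b in buckets]
  buckets.map (fun b => PySem.Set.ofList b)

-- ===== PRECONDITION & SPEC =====
def Spec_set_map (n : Int) (out : List (List Int)) : Prop := out = set_map_alt n
instance (n : Int) (out : List (List Int)) : Decidable (Spec_set_map n out) := by unfold Spec_set_map; infer_instance

-- ===== CLAIM (what is proved, stated in full; the proofs are below) =====
def Claim_equal_set_map : Prop := ∀ (n : Int), Dom_set_map n → Spec_set_map n (set_map n)

-- ===== LEMMAS AND PROOFS =====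

-- the common closed form both ports are proved equal to (n ≥ 0):
-- n row lines, n column lines, the main diagonal, the anti-diagonal
def pvE (n : Int) : List (List Int) :=
  ((List.range n.toNat).map (fun (k : Nat) => PySem.List.pyRange (1 + (k : Int) * n) (1 + (k : Int) * n + n) 1)
    ++ (List.range n.toNat).map (fun (k : Nat) => (PySem.List.pyRange 0 n 1).map (fun q => q * n + (k : Int) + 1))
    ++ [(PySem.List.pyRange 0 n 1).map (fun q => 1 + q * (n + 1))]
    ++ [(PySem.List.pyRange 0 n 1).map (fun q => n + q * (n - 1))]).map PySem.Set.ofList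

lemma pvSet2_eq (m : List (List Int)) (j i : Int) (k ki : Nat) (v : Int)
    (hj : j = ↑k) (hi : i = ↑ki) (hk : k < m.length) (hki : ki < (m[k]).length) :
    pvSet2 m j i v = m.set k ((m[k]).set ki v) := by
  subst hj hi
  simp [pvSet2, PySem.List.pySetD, PySem.List.pySet?_natCast, PySem.List.pyGetD_natCast, hk, hki]

lemma set_append_cons' {α : Type} (P S : List α) (r v : α) (j : Nat) (hj : j = P.length) :
    (P ++ r :: S).set j v = P ++ v :: S := by
  subst hj; simp

lemma getElem_append_cons' {α : Type} (P S : List α) (r : α) (j : Nat) (hj : j = P.length)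
    (h : j < (P ++ r :: S).length) : (P ++ r :: S)[j] = r := by
  subst hj; rw [List.getElem_append_right (le_refl _)]; simp

lemma take_set_succ {α : Type} (r : List α) (a : Nat) (v : α) (h : a < r.length) :
    (r.set a v).take (a + 1) = r.take a ++ [v] := by
  rw [List.take_add_one, List.take_set, List.getElem?_set_self (by simpa)]
  congr 1
  exact List.set_eq_of_length_le (by simp)

lemma range_map_succ {α : Type} (K : Nat) (f : Nat → α) :
    (List.range (K + 1)).map f = f 0 :: (List.range K).map (fun k => f (k + 1)) := by
  simp [List.range_succ_eq_map, List.map_map, Function.comp]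

-- inner loop of A's loop 1: fill columns a..n-1 of row k with consecutive values
lemma pvInnerRow (n : Int) (T : Nat) : ∀ (a i : Int) (k : Nat) (m : List (List Int)) (l0 : Int),
    0 ≤ a → a + (T : Int) = n → i = ↑k → (hk : k < m.length) → (m[k]).length = n.toNat →
    (PySem.List.pyRange a n 1).foldl
      (fun (s : List (List Int) × Int) j => (pvSet2 s.1 i j s.2, s.2 + 1)) (m, l0)
    = (m.set k ((m[k]).take a.toNat ++ PySem.List.pyRange l0 (l0 + T) 1), l0 + T) := by
  induction T with
  | zero =>
    intro a i k m l0 ha hT hi hk hlen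
    rw [PySem.List.pyRange_one_eq_nil (by omega)]
    simp [PySem.List.pyRange_one_eq_nil (le_refl l0)]
    rw [show a.toNat = (m[k]).length by omega]
    simp [List.set_getElem_self]
  | succ T ih =>
    intro a i k m l0 ha hT hi hk hlen
    rw [PySem.List.pyRange_one_cons (by push_cast at hT ⊢; omega)]
    simp only [List.foldl_cons]
    rw [pvSet2_eq m i a k a.toNat l0 hi (by omega) hk (by omega)]
    rw [ih (a+1) i k _ (l0+1) (by omega) (by push_cast at hT ⊢; omega) hi
        (by simpa using hk) (by simp [List.getElem_set_self (by simpa using hk)]; omega)]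
    rw [List.getElem_set_self (by simpa using hk), List.set_set]
    rw [show (a+1).toNat = a.toNat + 1 by omega]
    rw [take_set_succ _ _ _ (by omega)]
    rw [PySem.List.pyRange_one_cons (a := l0) (by push_cast; omega)]
    have h1 : l0 + ↑(T + 1) = l0 + 1 + ↑T := by push_cast; ring
    rw [h1]
    simp [List.append_assoc]

-- A's loop 1: rows a..b-1 (each of length n, initially zero) are overwritten with consecutive runs
lemma pvRowsLoop (n : Int) (hn : 0 ≤ n) (K : Nat) : ∀ (a b : Int) (P S M : List (List Int)) (l0 : Int),
    0 ≤ a → b = a + (K : Int) → P.length = a.toNat →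
    M = P ++ List.replicate K (List.replicate n.toNat 0) ++ S →
    (PySem.List.pyRange a b 1).foldl
      (fun (s : List (List Int) × Int) i =>
        (PySem.List.pyRange 0 n 1).foldl
          (fun (s : List (List Int) × Int) j => (pvSet2 s.1 i j s.2, s.2 + 1)) s)
      (M, l0)
    = (P ++ (List.range K).map (fun (k : Nat) => PySem.List.pyRange (l0 + (k : Int) * n) (l0 + (k : Int) * n + n) 1) ++ S,
       l0 + K * n) := by
  induction K with
  | zero =>
    intro a b P S M l0 ha hb hP hM
    rw [hb]
    rw [PySem.List.pyRange_one_eq_nil (a := a) (b := a + ((0:Nat):Int)) (by push_cast; omega)]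
    simp [hM]
  | succ K ih =>
    intro a b P S M l0 ha hb hP hM
    have hM' : M = P ++ List.replicate n.toNat 0 :: (List.replicate K (List.replicate n.toNat 0) ++ S) := by
      simp [hM, List.replicate_succ]
    rw [PySem.List.pyRange_one_cons (a := a) (b := b) (by push_cast at hb ⊢; omega)]
    simp only [List.foldl_cons]
    have hk : P.length < M.length := by simp [hM']
    have hrow : M[P.length]'hk = List.replicate n.toNat 0 := by
      rw [List.getElem_of_eq hM']
      exact getElem_append_cons' _ _ _ _ rfl _
    rw [pvInnerRow n n.toNat 0 a P.length M l0 (le_refl 0) (by omega) (by omega) hk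
        (by rw [hrow]; simp)]
    rw [hrow]
    simp only [Int.toNat_zero, List.take_zero, List.nil_append]
    rw [ih (a+1) b (P ++ [PySem.List.pyRange l0 (l0 + ↑n.toNat) 1]) S _ (l0 + ↑n.toNat)
        (by omega) (by push_cast at hb ⊢; omega) (by simp; omega)
        (by rw [hM', set_append_cons' _ _ _ _ _ rfl]; simp)]
    have hcast : ((n.toNat : Int)) = n := by omega
    rw [hcast]
    simp only [Prod.mk.injEq]
    constructor
    · rw [range_map_succ]
      simp only [Nat.cast_zero, zero_mul, add_zero, List.append_assoc, List.singleton_append]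
      congr 2
      congr 1
      apply List.map_congr_left
      intro k _
      congr 1 <;> push_cast <;> ring
    · push_cast; ring

-- inner loop of A's loop 2: one write at column ki of each of the K rows starting at index a
lemma pvColBlock (K : Nat) : ∀ (a b i : Int) (ki : Nat) (P S M : List (List Int)) (F : Nat → List Int) (l0 : Int),
    0 ≤ a → b = a + (K : Int) → i = ↑ki → P.length = a.toNat →
    (∀ k, k < K → ki < (F k).length) →
    M = P ++ (List.range K).map F ++ S →
    (PySem.List.pyRange a b 1).foldl
      (fun (s : List (List Int) × Int) j => (pvSet2 s.1 j i s.2, s.2 + 1)) (M, l0)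
    = (P ++ (List.range K).map (fun (k : Nat) => (F k).set ki (l0 + (k : Int))) ++ S, l0 + K) := by
  induction K with
  | zero =>
    intro a b i ki P S M F l0 ha hb hi hP hF hM
    rw [hb, PySem.List.pyRange_one_eq_nil (a := a) (b := a + ((0:Nat):Int)) (by push_cast; omega)]
    simp [hM]
  | succ K ih =>
    intro a b i ki P S M F l0 ha hb hi hP hF hM
    have hM' : M = P ++ F 0 :: ((List.range K).map (fun k => F (k+1)) ++ S) := by
      rw [hM, range_map_succ]; simp
    rw [PySem.List.pyRange_one_cons (a := a) (b := b) (by push_cast at hb ⊢; omega)]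
    simp only [List.foldl_cons]
    have hk : P.length < M.length := by simp [hM']
    have hrow : M[P.length]'hk = F 0 := by
      rw [List.getElem_of_eq hM']
      exact getElem_append_cons' _ _ _ _ rfl _
    rw [pvSet2_eq M a i P.length ki l0 (by omega) hi hk (by rw [hrow]; exact hF 0 (by omega))]
    rw [hrow]
    rw [hM', set_append_cons' _ _ _ _ _ rfl]
    rw [ih (a+1) b i ki (P ++ [(F 0).set ki l0]) S _ (fun k => F (k+1)) (l0+1)
        (by omega) (by push_cast at hb ⊢; omega) hi (by simp; omega)
        (fun k hkK => hF (k+1) (by omega)) (by simp)]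
    simp only [Prod.mk.injEq]
    constructor
    · rw [range_map_succ]
      simp only [Nat.cast_zero, add_zero, List.append_assoc, List.singleton_append]
      congr 2
      congr 1
      apply List.map_congr_left
      intro k _
      congr 1
      push_cast; ring
    · push_cast; ring

-- A's loop 2: fills the K = n column rows (indices n..2n-1), one column per outer step
lemma pvColsLoop (n : Int) (T : Nat) : ∀ (t l : Int) (P S M : List (List Int)),
    0 ≤ t → t + (T : Int) = n → P.length = n.toNat → l = 1 + t * n →
    M = P ++ (List.range n.toNat).map (fun (k : Nat) =>
          (PySem.List.pyRange 0 t 1).map (fun q => q * n + (k : Int) + 1) ++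
            List.replicate (n - t).toNat 0) ++ S →
    (PySem.List.pyRange t n 1).foldl
      (fun (s : List (List Int) × Int) i =>
        (PySem.List.pyRange n (n + n) 1).foldl
          (fun (s : List (List Int) × Int) j => (pvSet2 s.1 j i s.2, s.2 + 1)) s)
      (M, l)
    = (P ++ (List.range n.toNat).map (fun (k : Nat) =>
          (PySem.List.pyRange 0 n 1).map (fun q => q * n + (k : Int) + 1)) ++ S,
       1 + n * n) := by
  induction T with
  | zero =>
    intro t l P S M ht hT hP hl hM
    obtain rfl : t = n := by push_cast at hT; omega
    rw [PySem.List.pyRange_one_eq_nil (a := t) (b := t) (le_refl t)]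
    simp only [List.foldl_nil]
    rw [hM, hl]
    simp
  | succ T ih =>
    intro t l P S M ht hT hT' hl hM
    have htn : t < n := by push_cast at hT; omega
    have hcast : ((n.toNat : Int)) = n := by omega
    rw [PySem.List.pyRange_one_cons (a := t) (b := n) htn]
    simp only [List.foldl_cons]
    rw [pvColBlock n.toNat n (n + n) t t.toNat P S M
        (fun (k : Nat) => (PySem.List.pyRange 0 t 1).map (fun q => q * n + (k : Int) + 1) ++
          List.replicate (n - t).toNat 0) l
        (by omega) (by omega) (by omega) hT'
        (fun k hkK => by simp [PySem.List.length_pyRange_one]; omega) hM]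
    have hstep : ∀ k : Nat,
        ((PySem.List.pyRange 0 t 1).map (fun q => q * n + (k : Int) + 1) ++
          List.replicate (n - t).toNat 0).set t.toNat (l + (k : Int))
        = (PySem.List.pyRange 0 (t + 1) 1).map (fun q => q * n + (k : Int) + 1) ++
            List.replicate (n - (t + 1)).toNat 0 := by
      intro k
      rw [show List.replicate (n - t).toNat (0:Int) = 0 :: List.replicate (n - (t+1)).toNat 0 by
        rw [show (n - t).toNat = (n - (t+1)).toNat + 1 by omega, List.replicate_succ]]
      rw [set_append_cons' _ _ _ _ _ (by simp [PySem.List.length_pyRange_one])]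
      rw [PySem.List.pyRange_one_succ_right (by omega), List.map_append]
      simp only [List.map_cons, List.map_nil, List.append_assoc, List.singleton_append]
      congr 2
      rw [hl]; ring
    rw [ih (t+1) (l + ↑n.toNat) P S _ (by omega) (by push_cast at hT ⊢; omega) hT'
        (by rw [hl, hcast]; ring)
        (by congr 1; congr 1; apply List.map_congr_left; intro k _; exact hstep k)]

-- A's loops 3 and 4: fill columns t..n-1 of the single row at index r = |P| with an arithmetic run
lemma pvDiagLoop (n : Int) (T : Nat) : ∀ (t l l00 st r : Int) (P S M : List (List Int)),
    0 ≤ t → t + (T : Int) = n → r = ↑P.length → l = l00 + t * st →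
    M = P ++ ((PySem.List.pyRange 0 t 1).map (fun q => l00 + q * st) ++
              List.replicate (n - t).toNat 0) :: S →
    (PySem.List.pyRange t n 1).foldl
      (fun (s : List (List Int) × Int) i =>
        (PySem.List.pyRange r (r + 1) 1).foldl
          (fun (s : List (List Int) × Int) j => (pvSet2 s.1 j i s.2, s.2 + st)) s)
      (M, l)
    = (P ++ ((PySem.List.pyRange 0 n 1).map (fun q => l00 + q * st)) :: S, l00 + n * st) := by
  induction T with
  | zero =>
    intro t l l00 st r P S M ht hT hr hl hM
    obtain rfl : t = n := by push_cast at hT; omega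
    rw [PySem.List.pyRange_one_eq_nil (a := t) (b := t) (le_refl t)]
    simp only [List.foldl_nil]
    rw [hM, hl]
    simp
  | succ T ih =>
    intro t l l00 st r P S M ht hT hr hl hM
    have htn : t < n := by push_cast at hT; omega
    rw [PySem.List.pyRange_one_cons (a := t) (b := n) htn]
    simp only [List.foldl_cons]
    have hhead : (PySem.List.pyRange r (r+1) 1).foldl
        (fun (s : List (List Int) × Int) j => (pvSet2 s.1 j t s.2, s.2 + st)) (M, l)
        = (pvSet2 M r t l, l + st) := by
      rw [PySem.List.pyRange_one_singleton]
      rfl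
    rw [hhead]
    have hk : P.length < M.length := by simp [hM]
    have hrow : M[P.length]'hk =
        (PySem.List.pyRange 0 t 1).map (fun q => l00 + q * st) ++ List.replicate (n - t).toNat 0 := by
      rw [List.getElem_of_eq hM]
      exact getElem_append_cons' _ _ _ _ rfl _
    rw [pvSet2_eq M r t P.length t.toNat l hr (by omega) hk
        (by rw [hrow]; simp [PySem.List.length_pyRange_one]; omega)]
    rw [hrow, hM, set_append_cons' _ _ _ _ _ rfl]
    have hsteprow :
        ((PySem.List.pyRange 0 t 1).map (fun q => l00 + q * st) ++
          List.replicate (n - t).toNat 0).set t.toNat l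
        = (PySem.List.pyRange 0 (t + 1) 1).map (fun q => l00 + q * st) ++
            List.replicate (n - (t + 1)).toNat 0 := by
      rw [show List.replicate (n - t).toNat (0:Int) = 0 :: List.replicate (n - (t+1)).toNat 0 by
        rw [show (n - t).toNat = (n - (t+1)).toNat + 1 by omega, List.replicate_succ]]
      rw [set_append_cons' _ _ _ _ _ (by simp [PySem.List.length_pyRange_one])]
      rw [PySem.List.pyRange_one_succ_right (by omega), List.map_append]
      simp only [List.map_cons, List.map_nil, List.append_assoc, List.singleton_append]
      congr 2
    rw [hsteprow]
    exact ih (t+1) (l + st) l00 st r P S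
      (P ++ ((PySem.List.pyRange 0 (t+1) 1).map (fun q => l00 + q * st) ++
             List.replicate (n - (t+1)).toNat 0) :: S)
      (by omega) (by push_cast at hT ⊢; omega) hr (by rw [hl]; ring) rfl

-- A equals the closed form for n ≥ 0
theorem pvMainA (n : Int) (hn : 0 ≤ n) : set_map n = pvE n := by
  have hcast : ((n.toNat : Int)) = n := by omega
  simp only [set_map]
  simp only [PySem.List.foldl_append_singleton_eq_map, List.nil_append]
  rw [List.map_const', PySem.List.length_pyRange_one]
  rw [pvRowsLoop n hn n.toNat 0 n []
      (List.replicate n.toNat (List.replicate n.toNat 0) ++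
        [List.replicate n.toNat 0, List.replicate n.toNat 0]) _ 1
      (le_refl 0) (by omega) (by simp)
      (by rw [show (n + n + 2 - 0).toNat = n.toNat + (n.toNat + 2) by omega]
          simp [List.replicate_add, List.replicate_succ'])]
  have hr00 : PySem.List.pyRange 0 0 1 = [] := PySem.List.pyRange_one_eq_nil (le_refl 0)
  rw [pvColsLoop n n.toNat 0 1
      (List.map (fun (k : Nat) => PySem.List.pyRange (1 + (k : Int) * n) (1 + (k : Int) * n + n) 1) (List.range n.toNat))
      [List.replicate n.toNat 0, List.replicate n.toNat 0] _
      (le_refl 0) (by omega) (by simp) (by ring)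
      (by simp [hr00, List.map_const', List.length_range])]
  rw [pvDiagLoop n n.toNat 0 1 1 (n + 1) (n + n)
      (List.map (fun (k : Nat) => PySem.List.pyRange (1 + (k : Int) * n) (1 + (k : Int) * n + n) 1) (List.range n.toNat) ++
        List.map (fun (k : Nat) => List.map (fun q => q * n + (k : Int) + 1) (PySem.List.pyRange 0 n 1)) (List.range n.toNat))
      [List.replicate n.toNat 0] _
      (le_refl 0) (by omega) (by simp; omega) (by ring)
      (by simp [hr00])]
  rw [show (PySem.List.pyRange (n + n + 1) (n + n + 2) 1) = PySem.List.pyRange (n + n + 1) ((n + n + 1) + 1) 1 from by ring_nf]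
  rw [pvDiagLoop n n.toNat 0 n n (n - 1) (n + n + 1)
      (List.map (fun (k : Nat) => PySem.List.pyRange (1 + (k : Int) * n) (1 + (k : Int) * n + n) 1) (List.range n.toNat) ++
        List.map (fun (k : Nat) => List.map (fun q => q * n + (k : Int) + 1) (PySem.List.pyRange 0 n 1)) (List.range n.toNat) ++
        [List.map (fun q => 1 + q * (n + 1)) (PySem.List.pyRange 0 n 1)])
      [] _
      (le_refl 0) (by omega) (by simp; omega) (by ring)
      (by simp [hr00])]
  simp only [pvE, List.map_append, List.map_map, List.map_cons, List.map_nil, List.append_assoc]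

-- appending at a known in-range index
lemma pvApp_eq (m : List (List Int)) (j : Int) (k : Nat) (c : Int)
    (hj : j = ↑k) (hk : k < m.length) :
    pvApp m j c = m.set k ((m[k]) ++ [c]) := by
  subst hj
  simp [pvApp, PySem.List.pySetD, PySem.List.pySet?_natCast, PySem.List.pyGetD_natCast, hk]

lemma pvApp_at (P S : List (List Int)) (x : List Int) (j c : Int) (hj : j = ↑P.length) :
    pvApp (P ++ x :: S) j c = P ++ (x ++ [c]) :: S := by
  rw [pvApp_eq _ _ P.length _ hj (by simp)]
  rw [getElem_append_cons' _ _ _ _ rfl, set_append_cons' _ _ _ _ _ rfl]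

-- one scatter step on the canonical 4-segment bucket state:
-- rows (bucket r open), columns (bucket t next), main diagonal, anti-diagonal
lemma pvStep (n r t : Int) (P1 S1 Cdone Ctodo : List (List Int)) (rowr f0 D A : List Int)
    (hr0 : 0 ≤ r) (hrn : r < n) (ht0 : 0 ≤ t) (htn : t < n)
    (hP1 : P1.length = r.toNat) (hS1 : S1.length = (n - r - 1).toNat)
    (hC : Cdone.length = t.toNat) (hC2 : Ctodo.length = (n - t - 1).toNat) :
    pvScatterStep n (P1 ++ rowr :: (S1 ++ Cdone ++ (f0 :: Ctodo) ++ [D, A])) r t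
    = P1 ++ (rowr ++ [r * n + t + 1]) ::
        (S1 ++ (Cdone ++ [f0 ++ [r * n + t + 1]]) ++ Ctodo ++
         [D ++ (if r = t then [r * n + t + 1] else []),
          A ++ (if r + t = n - 1 then [r * n + t + 1] else [])]) := by
  simp only [pvScatterStep]
  rw [pvApp_at P1 _ rowr r _ (by rw [hP1]; omega)]
  rw [show P1 ++ (rowr ++ [r * n + t + 1]) :: (S1 ++ Cdone ++ (f0 :: Ctodo) ++ [D, A])
      = (P1 ++ (rowr ++ [r * n + t + 1]) :: (S1 ++ Cdone)) ++ f0 :: (Ctodo ++ [D, A]) from by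
    simp [List.append_assoc]]
  rw [pvApp_at _ _ f0 (n + t) _ (by simp [hP1, hS1, hC]; omega)]
  by_cases hrt : r = t
  · simp only [if_pos hrt]
    rw [show (P1 ++ (rowr ++ [r * n + t + 1]) :: (S1 ++ Cdone)) ++ (f0 ++ [r * n + t + 1]) :: (Ctodo ++ [D, A])
        = ((P1 ++ (rowr ++ [r * n + t + 1]) :: (S1 ++ Cdone)) ++ (f0 ++ [r * n + t + 1]) :: Ctodo) ++ D :: [A] from by
      simp [List.append_assoc]]
    rw [pvApp_at _ _ D (n + n) _ (by simp [hP1, hS1, hC, hC2]; omega)]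
    by_cases hat : r + t = n - 1
    · simp only [if_pos hat]
      rw [show ((P1 ++ (rowr ++ [r * n + t + 1]) :: (S1 ++ Cdone)) ++ (f0 ++ [r * n + t + 1]) :: Ctodo) ++ (D ++ [r * n + t + 1]) :: [A]
          = (((P1 ++ (rowr ++ [r * n + t + 1]) :: (S1 ++ Cdone)) ++ (f0 ++ [r * n + t + 1]) :: Ctodo) ++ [D ++ [r * n + t + 1]]) ++ A :: [] from by
        simp [List.append_assoc]]
      rw [pvApp_at _ _ A (n + n + 1) _ (by simp [hP1, hS1, hC, hC2]; omega)]
      simp [List.append_assoc]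
    · simp only [if_neg hat]
      simp [List.append_assoc]
  · simp only [if_neg hrt]
    by_cases hat : r + t = n - 1
    · simp only [if_pos hat]
      rw [show (P1 ++ (rowr ++ [r * n + t + 1]) :: (S1 ++ Cdone)) ++ (f0 ++ [r * n + t + 1]) :: (Ctodo ++ [D, A])
          = ((P1 ++ (rowr ++ [r * n + t + 1]) :: (S1 ++ Cdone)) ++ (f0 ++ [r * n + t + 1]) :: (Ctodo ++ [D])) ++ A :: [] from by
        simp [List.append_assoc]]
      rw [pvApp_at _ _ A (n + n + 1) _ (by simp [hP1, hS1, hC, hC2]; omega)]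
      simp [List.append_assoc]
    · simp only [if_neg hat]
      simp [List.append_assoc]

-- B's inner loop: scatter the cells (r, t), (r, t+1), …, (r, n-1) of row r
lemma pvInner (n r : Int) (hr0 : 0 ≤ r) (hrn : r < n) (T : Nat) :
    ∀ (t : Int) (P1 S1 Cdone : List (List Int)) (rowr D A : List Int) (F : Nat → List Int),
    0 ≤ t → t + (T : Int) = n → P1.length = r.toNat → S1.length = (n - r - 1).toNat →
    Cdone.length = t.toNat →
    (PySem.List.pyRange t n 1).foldl (fun bs col => pvScatterStep n bs r col)
      (P1 ++ rowr :: (S1 ++ Cdone ++ (List.range T).map F ++ [D, A]))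
    = P1 ++ (rowr ++ PySem.List.pyRange (r * n + t + 1) (r * n + n + 1) 1) ::
        (S1 ++ Cdone ++ (List.range T).map (fun k => F k ++ [r * n + t + (k : Int) + 1]) ++
         [D ++ (if t ≤ r then [r * n + r + 1] else []),
          A ++ (if t ≤ n - 1 - r then [r * n + (n - 1 - r) + 1] else [])]) := by
  induction T with
  | zero =>
    intro t P1 S1 Cdone rowr D A F ht0 hT hP1 hS1 hC
    have hteq : t = n := by push_cast at hT; omega
    rw [hteq]
    rw [PySem.List.pyRange_one_eq_nil (le_refl n)]
    rw [PySem.List.pyRange_one_eq_nil (le_refl (r * n + n + 1))]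
    rw [if_neg (by omega), if_neg (by omega)]
    simp
  | succ T ih =>
    intro t P1 S1 Cdone rowr D A F ht0 hT hP1 hS1 hC
    have htn : t < n := by push_cast at hT; omega
    rw [PySem.List.pyRange_one_cons htn]
    simp only [List.foldl_cons]
    rw [range_map_succ]
    rw [pvStep n r t P1 S1 Cdone ((List.range T).map (fun k => F (k + 1))) rowr (F 0) D A
        hr0 hrn ht0 htn hP1 hS1 hC (by simp; omega)]
    rw [ih (t + 1) P1 S1 (Cdone ++ [F 0 ++ [r * n + t + 1]]) (rowr ++ [r * n + t + 1])
        (D ++ (if r = t then [r * n + t + 1] else [])) (A ++ (if r + t = n - 1 then [r * n + t + 1] else []))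
        (fun k => F (k + 1))
        (by omega) (by push_cast at hT ⊢; omega) hP1 hS1 (by simp [hC]; omega)]
    have hrow : rowr ++ PySem.List.pyRange (r * n + t + 1) (r * n + n + 1) 1
        = rowr ++ [r * n + t + 1] ++ PySem.List.pyRange (r * n + (t + 1) + 1) (r * n + n + 1) 1 := by
      rw [PySem.List.pyRange_one_cons (show r * n + t + 1 < r * n + n + 1 by linarith)]
      rw [show r * n + (t + 1) + 1 = r * n + t + 1 + 1 by ring]
      simp
    have hcols : (List.range (T + 1)).map (fun k => F k ++ [r * n + t + (k : Int) + 1])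
        = (F 0 ++ [r * n + t + 1]) :: (List.range T).map (fun k => F (k + 1) ++ [r * n + (t + 1) + (k : Int) + 1]) := by
      rw [range_map_succ]
      congr 1
      · simp
      · apply List.map_congr_left
        intro k _
        congr 2
        push_cast; ring
    have hD : (D ++ (if r = t then [r * n + t + 1] else [])) ++ (if t + 1 ≤ r then [r * n + r + 1] else [])
        = D ++ (if t ≤ r then [r * n + r + 1] else []) := by
      by_cases hrt : r = t
      · subst hrt
        rw [if_pos rfl, if_neg (by omega), if_pos (by omega)]
        simp
      · rw [if_neg hrt]
        by_cases htr : t ≤ r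
        · rw [if_pos (by omega), if_pos htr]
          simp
        · rw [if_neg (by omega), if_neg htr]
          simp
    have hA : (A ++ (if r + t = n - 1 then [r * n + t + 1] else [])) ++
          (if t + 1 ≤ n - 1 - r then [r * n + (n - 1 - r) + 1] else [])
        = A ++ (if t ≤ n - 1 - r then [r * n + (n - 1 - r) + 1] else []) := by
      by_cases hat : r + t = n - 1
      · have h' : n - 1 - r = t := by omega
        rw [if_pos hat, if_neg (by omega), if_pos (by omega), h']
        simp
      · rw [if_neg hat]
        by_cases hta : t ≤ n - 1 - r
        · rw [if_pos (by omega), if_pos hta]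
          simp
        · rw [if_neg (by omega), if_neg hta]
          simp
    rw [hrow, hcols, hD, hA]
    simp [List.append_assoc]

-- B's outer loop: scatter rows r..n-1
lemma pvOuter (n : Int) (T : Nat) : ∀ (r : Int) (Rdone : List (List Int)) (D A : List Int),
    0 ≤ r → r + (T : Int) = n → Rdone.length = r.toNat →
    (PySem.List.pyRange r n 1).foldl
      (fun bs rr => (PySem.List.pyRange 0 n 1).foldl (fun bs col => pvScatterStep n bs rr col) bs)
      (Rdone ++ List.replicate T ([] : List Int) ++
        (List.range n.toNat).map (fun (k : Nat) => (PySem.List.pyRange 0 r 1).map (fun q => q * n + (k : Int) + 1)) ++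
        [D, A])
    = Rdone ++ (List.range T).map (fun (k : Nat) => PySem.List.pyRange ((r + (k : Int)) * n + 1) ((r + (k : Int)) * n + n + 1) 1) ++
        (List.range n.toNat).map (fun (k : Nat) => (PySem.List.pyRange 0 n 1).map (fun q => q * n + (k : Int) + 1)) ++
        [D ++ (PySem.List.pyRange r n 1).map (fun q => q * n + q + 1),
         A ++ (PySem.List.pyRange r n 1).map (fun q => q * n + (n - 1 - q) + 1)] := by
  induction T with
  | zero =>
    intro r Rdone D A hr0 hT hR
    have hreq : r = n := by push_cast at hT; omega
    rw [hreq]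
    rw [PySem.List.pyRange_one_eq_nil (le_refl n)]
    simp
  | succ T ih =>
    intro r Rdone D A hr0 hT hR
    have hrn : r < n := by push_cast at hT; omega
    have hn0 : 0 ≤ n := by omega
    rw [PySem.List.pyRange_one_cons hrn]
    simp only [List.foldl_cons]
    rw [List.replicate_succ]
    rw [show Rdone ++ ([] :: List.replicate T ([] : List Int)) ++
          (List.range n.toNat).map (fun (k : Nat) => (PySem.List.pyRange 0 r 1).map (fun q => q * n + (k : Int) + 1)) ++ [D, A]
        = Rdone ++ [] :: (List.replicate T ([] : List Int) ++ [] ++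
          (List.range n.toNat).map (fun (k : Nat) => (PySem.List.pyRange 0 r 1).map (fun q => q * n + (k : Int) + 1)) ++ [D, A]) from by
      simp [List.append_assoc]]
    rw [pvInner n r hr0 hrn n.toNat 0 Rdone (List.replicate T ([] : List Int)) [] [] D A
        (fun (k : Nat) => (PySem.List.pyRange 0 r 1).map (fun q => q * n + (k : Int) + 1))
        (le_refl 0) (by omega) hR (by simp; omega) (by simp)]
    rw [if_pos hr0, if_pos (by omega)]
    rw [show ((List.range n.toNat).map (fun (k : Nat) =>
          (PySem.List.pyRange 0 r 1).map (fun q => q * n + (k : Int) + 1) ++ [r * n + 0 + (k : Int) + 1]))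
        = (List.range n.toNat).map (fun (k : Nat) => (PySem.List.pyRange 0 (r + 1) 1).map (fun q => q * n + (k : Int) + 1)) from by
      apply List.map_congr_left
      intro k _
      rw [PySem.List.pyRange_one_succ_right hr0, List.map_append]
      simp only [List.map_cons, List.map_nil]
      congr 3
      ring]
    rw [show Rdone ++ ([] ++ PySem.List.pyRange (r * n + 0 + 1) (r * n + n + 1) 1) ::
          (List.replicate T ([] : List Int) ++ [] ++
            (List.range n.toNat).map (fun (k : Nat) => (PySem.List.pyRange 0 (r + 1) 1).map (fun q => q * n + (k : Int) + 1)) ++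
            [D ++ [r * n + r + 1], A ++ [r * n + (n - 1 - r) + 1]])
        = (Rdone ++ [PySem.List.pyRange (r * n + 0 + 1) (r * n + n + 1) 1]) ++ List.replicate T ([] : List Int) ++
            (List.range n.toNat).map (fun (k : Nat) => (PySem.List.pyRange 0 (r + 1) 1).map (fun q => q * n + (k : Int) + 1)) ++
            [D ++ [r * n + r + 1], A ++ [r * n + (n - 1 - r) + 1]] from by
      simp [List.append_assoc]]
    rw [ih (r + 1) (Rdone ++ [PySem.List.pyRange (r * n + 0 + 1) (r * n + n + 1) 1])
        (D ++ [r * n + r + 1]) (A ++ [r * n + (n - 1 - r) + 1])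
        (by omega) (by push_cast at hT ⊢; omega) (by simp [hR]; omega)]
    have hrows : (List.range (T + 1)).map (fun (k : Nat) =>
          PySem.List.pyRange ((r + (k : Int)) * n + 1) ((r + (k : Int)) * n + n + 1) 1)
        = PySem.List.pyRange (r * n + 0 + 1) (r * n + n + 1) 1 ::
          (List.range T).map (fun (k : Nat) =>
            PySem.List.pyRange ((r + 1 + (k : Int)) * n + 1) ((r + 1 + (k : Int)) * n + n + 1) 1) := by
      rw [range_map_succ]
      congr 1
      · rw [show (r + ((0 : Nat) : Int)) * n + 1 = r * n + 0 + 1 by push_cast; ring,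
            show (r + ((0 : Nat) : Int)) * n + n + 1 = r * n + n + 1 by push_cast; ring]
      · apply List.map_congr_left
        intro k _
        rw [show (r + ((k + 1 : Nat) : Int)) * n + 1 = (r + 1 + (k : Int)) * n + 1 by push_cast; ring,
            show (r + ((k + 1 : Nat) : Int)) * n + n + 1 = (r + 1 + (k : Int)) * n + n + 1 by push_cast; ring]
    rw [hrows]
    simp [List.append_assoc]

-- B equals the closed form for n ≥ 0
theorem pvMainAlt (n : Int) (hn : 0 ≤ n) : set_map_alt n = pvE n := by
  simp only [set_map_alt]
  rw [List.map_const', PySem.List.length_pyRange_one]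
  have hr00 : PySem.List.pyRange 0 0 1 = [] := PySem.List.pyRange_one_eq_nil (le_refl 0)
  rw [show List.replicate (n + n + 2 - 0).toNat ([] : List Int)
      = ([] : List (List Int)) ++ List.replicate n.toNat ([] : List Int) ++
        (List.range n.toNat).map (fun (k : Nat) => (PySem.List.pyRange 0 0 1).map (fun q => q * n + (k : Int) + 1)) ++
        [[], []] from by
    rw [show ((List.range n.toNat).map (fun (k : Nat) => (PySem.List.pyRange 0 0 1).map (fun q => q * n + (k : Int) + 1)))
        = List.replicate n.toNat ([] : List Int) from by
      simp [hr00]]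
    rw [show (n + n + 2 - 0).toNat = n.toNat + n.toNat + 2 by omega]
    rw [List.replicate_add, List.replicate_add]
    simp [List.replicate_succ]]
  rw [pvOuter n n.toNat 0 [] [] [] (le_refl 0) (by omega) (by simp)]
  have hrows' : (List.range n.toNat).map
        (fun (k : Nat) => PySem.List.pyRange (((0 : Int) + (k : Int)) * n + 1) (((0 : Int) + (k : Int)) * n + n + 1) 1)
      = (List.range n.toNat).map (fun (k : Nat) => PySem.List.pyRange (1 + (k : Int) * n) (1 + (k : Int) * n + n) 1) := by
    apply List.map_congr_left
    intro k _
    rw [show ((0 : Int) + (k : Int)) * n + 1 = 1 + (k : Int) * n by ring,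
        show ((0 : Int) + (k : Int)) * n + n + 1 = 1 + (k : Int) * n + n by ring]
  have hdiag' : (PySem.List.pyRange 0 n 1).map (fun q => q * n + q + 1)
      = (PySem.List.pyRange 0 n 1).map (fun q => 1 + q * (n + 1)) := by
    apply List.map_congr_left
    intro q _
    ring
  have hanti' : (PySem.List.pyRange 0 n 1).map (fun q => q * n + (n - 1 - q) + 1)
      = (PySem.List.pyRange 0 n 1).map (fun q => n + q * (n - 1)) := by
    apply List.map_congr_left
    intro q _
    ring
  rw [hrows', hdiag', hanti']
  simp only [pvE, List.nil_append, List.map_append, List.append_assoc, List.map_cons, List.map_nil]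
  rfl

theorem pvMainNeg (n : Int) (hn : n < 0) : set_map n = set_map_alt n := by
  have h1 : PySem.List.pyRange 0 (n + n + 2) 1 = [] := PySem.List.pyRange_one_eq_nil (by omega)
  have h2 : PySem.List.pyRange 0 n 1 = [] := PySem.List.pyRange_one_eq_nil (by omega)
  simp only [set_map, set_map_alt, h1, h2, List.foldl_nil, List.map_nil]

-- ===== VERDICT (by name: the statement is the Claim_ definition above) =====
theorem set_map_spec : Claim_equal_set_map := by
  intro n _
  show set_map n = set_map_alt n
  rcases lt_or_ge n 0 with h | h
  · exact pvMainNeg n h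
  · rw [pvMainA n h, pvMainAlt n h]
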